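-- pv_equiv track=rewrite | github.com/wonhyungLee/trader | server.py | _extract_value_after_label
-- ===== SOURCE A (Python) =====
-- from typing import Any, Dict, Tuple, Optional, List
--
-- def _extract_value_after_label(lines: List[str], labels: List[str]) -> Optional[str]:
--     lowered = [l.strip().lower() for l in labels if l and str(l).strip()]
--     for i, raw in enumerate(lines):
--         line = str(raw or "").strip()
--         if not line:
--             continue
--         low = line.lower()
--         if any(low == lab or low.startswith(lab) for lab in lowered):
--             for j in range(i + 1, min(len(lines), i + 10)):
--                 candidate = str(lines[j] or "").strip()
--                 if candidate:
--                     return candidate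
--     return None
-- ===== SOURCE B (Python) =====
-- def _extract_value_after_label(lines, labels):
--     lowered = [l.strip().lower() for l in labels if l and str(l).strip()]
--     pending_end = -1
--     for i, raw in enumerate(lines):
--         line = str(raw or "").strip()
--         if not line:
--             continue
--         if i <= pending_end:
--             return line
--         low = line.lower()
--         if any(low == lab or low.startswith(lab) for lab in lowered):
--             pending_end = i + 9
--     return None
-- ===== Notes on version B (the rewrite author's own statement) =====
-- stated objective: alternative
-- what changed: Replaced A's nested lookahead loop (scan up to 9 lines after each matching label) with a single linear pass that maintains a pending window-end index and returns the first non-empty line falling inside the window.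
import Mathlib
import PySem

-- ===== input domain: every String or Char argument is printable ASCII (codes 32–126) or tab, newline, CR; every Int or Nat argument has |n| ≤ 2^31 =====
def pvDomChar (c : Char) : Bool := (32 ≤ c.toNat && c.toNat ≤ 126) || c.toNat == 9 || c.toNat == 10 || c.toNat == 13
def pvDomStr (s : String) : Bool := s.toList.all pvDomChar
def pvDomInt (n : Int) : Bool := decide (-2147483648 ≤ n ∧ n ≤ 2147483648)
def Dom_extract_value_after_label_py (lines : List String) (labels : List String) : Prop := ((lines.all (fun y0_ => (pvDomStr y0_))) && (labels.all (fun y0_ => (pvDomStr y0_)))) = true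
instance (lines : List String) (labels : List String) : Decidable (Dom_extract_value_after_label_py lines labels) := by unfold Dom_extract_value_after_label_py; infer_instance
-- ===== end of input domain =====

-- B replaces A's nested 9-line lookahead loop with a single pass maintaining a pending
-- window-end index (objective: alternative decomposition, same result).

-- ===== PORT A =====
-- [l.strip().lower() for l in labels if l and str(l).strip()]
def pvA_lowered (labels : List String) : List String :=
  (labels.filter (fun l => decide (l ≠ "") && decide (PySem.Str.strip l ≠ ""))).map
    (fun l => PySem.Str.lower (PySem.Str.strip l))

-- inner lookahead: for j in range(i+1, min(len(lines), i+10)): return first non-empty strip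
def pvA_inner (lines : List String) (js : List Int) : Option String :=
  match js with
  | [] => none
  | j :: rest =>
      let candidate := PySem.Str.strip (PySem.List.pyGetD lines j "")
      if candidate ≠ "" then some candidate else pvA_inner lines rest

def pvA_outer (lines : List String) (lowered : List String) (items : List (Int × String)) :
    Option String :=
  match items with
  | [] => none
  | (i, raw) :: rest =>
      let line := PySem.Str.strip raw
      if line = "" then pvA_outer lines lowered rest
      else
        let low := PySem.Str.lower line
        if lowered.any (fun lab => low == lab || PySem.Str.startswith low lab) then
          match pvA_inner lines
              (PySem.List.pyRange (i + 1) (min (lines.length : Int) (i + 10)) 1) with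
          | some c => some c
          | none => pvA_outer lines lowered rest
        else pvA_outer lines lowered rest

def extract_value_after_label_py (lines : List String) (labels : List String) : Option String :=
  pvA_outer lines (pvA_lowered labels) (PySem.List.enumerate lines 0)

-- ===== PORT B =====
def pvB_lowered (labels : List String) : List String :=
  (labels.filter (fun l => decide (l ≠ "") && decide (PySem.Str.strip l ≠ ""))).map
    (fun l => PySem.Str.lower (PySem.Str.strip l))

-- single pass: skip empties; return if inside the pending window; else on a match extend it
def pvB_loop (lowered : List String) (items : List (Int × String)) (pendingEnd : Int) :
    Option String :=
  match items with
  | [] => none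
  | (i, raw) :: rest =>
      let line := PySem.Str.strip raw
      if line = "" then pvB_loop lowered rest pendingEnd
      else if i ≤ pendingEnd then some line
      else
        let low := PySem.Str.lower line
        if lowered.any (fun lab => low == lab || PySem.Str.startswith low lab) then
          pvB_loop lowered rest (i + 9)
        else pvB_loop lowered rest pendingEnd

def extract_value_after_label_py_alt (lines : List String) (labels : List String) :
    Option String :=
  pvB_loop (pvB_lowered labels) (PySem.List.enumerate lines 0) (-1)

-- ===== PRECONDITION & SPEC =====
def Spec_extract_value_after_label_py (lines : List String) (labels : List String) (out : Option String) : Prop := out = extract_value_after_label_py_alt lines labels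
instance (lines : List String) (labels : List String) (out : Option String) : Decidable (Spec_extract_value_after_label_py lines labels out) := by unfold Spec_extract_value_after_label_py; infer_instance

-- ===== CLAIM (what is proved, stated in full; the proofs are below) =====
def Claim_equal_extract_value_after_label_py : Prop := ∀ (lines : List String) (labels : List String), Dom_extract_value_after_label_py lines labels → Spec_extract_value_after_label_py lines labels (extract_value_after_label_py lines labels)

-- ===== LEMMAS AND PROOFS =====

theorem pv_lowered_eq (labels : List String) : pvB_lowered labels = pvA_lowered labels := rfl

theorem pv_pyRange_one_nil {a b : Int} (h : b ≤ a) : PySem.List.pyRange a b 1 = [] := by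
  rw [show PySem.List.pyRange a b 1 = PySem.List.pyRange a b from rfl,
    PySem.List.pyRange_one a b]
  simp [Int.toNat_of_nonpos (by omega : b - a ≤ 0)]

-- Core invariant: on the suffix starting at index k, B with pending window end `pe`
-- computes A's pending inner scan over [k, min(len, pe+1)) followed by A's outer loop.
theorem pv_main (lines lowered : List String) :
    ∀ (suf : List String) (k : Nat) (pe : Int),
      lines.drop k = suf →
      pvB_loop lowered (PySem.List.enumerate suf (k : Int)) pe =
        (match pvA_inner lines
            (PySem.List.pyRange (k : Int) (min (lines.length : Int) (pe + 1)) 1) with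
         | some c => some c
         | none => pvA_outer lines lowered (PySem.List.enumerate suf (k : Int))) := by
  intro suf
  induction suf with
  | nil =>
      intro k pe hd
      have hk : lines.length ≤ k := by
        have := congrArg List.length hd; simp at this; omega
      rw [pv_pyRange_one_nil (by omega : min (lines.length : Int) (pe + 1) ≤ (k : Int))]
      simp [PySem.List.enumerate_nil, pvB_loop, pvA_inner, pvA_outer]
  | cons raw suf' ih =>
      intro k pe hd
      have hklt : k < lines.length := by
        have := congrArg List.length hd; simp at this; omega
      have hget : lines[k]? = some raw := by
        have h0 : (lines.drop k)[0]? = some raw := by rw [hd]; rfl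
        rw [List.getElem?_drop] at h0; simpa using h0
      have hraw : PySem.List.pyGetD lines (k : Int) "" = raw := by
        rw [PySem.List.pyGetD_natCast, List.getD_eq_getElem?_getD, hget]; rfl
      have hd' : lines.drop (k + 1) = suf' := by
        rw [← List.tail_drop, hd]; rfl
      rw [PySem.List.enumerate_cons]
      by_cases hline : PySem.Str.strip raw = ""
      · -- empty line: both sides skip index k
        have hrng : ∀ m : Int,
            pvA_inner lines (PySem.List.pyRange (k : Int) m 1) =
            pvA_inner lines (PySem.List.pyRange ((k : Int) + 1) m 1) := by
          intro m
          by_cases hkm : (k : Int) < m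
          · rw [show PySem.List.pyRange (k : Int) m 1 = PySem.List.pyRange (k : Int) m from rfl,
              PySem.List.pyRange_one_cons hkm]
            simp only [pvA_inner, hraw, hline]
            simp
          · rw [pv_pyRange_one_nil (by omega), pv_pyRange_one_nil (by omega)]
        simp only [pvB_loop, pvA_outer, hline]
        have := ih (k + 1) pe hd'
        push_cast at this ⊢
        rw [this, ← hrng]
      · -- non-empty line at index k
        by_cases hpe : (k : Int) ≤ pe
        · -- B returns; A's pending inner scan hits index k
          have hkm : (k : Int) < min (lines.length : Int) (pe + 1) := by omega
          rw [show PySem.List.pyRange (k : Int) (min (lines.length : Int) (pe + 1)) 1 =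
              PySem.List.pyRange (k : Int) (min (lines.length : Int) (pe + 1)) from rfl,
            PySem.List.pyRange_one_cons hkm]
          simp only [pvB_loop, pvA_inner, hraw, hline, if_pos hpe]
          simp [hline]
        · -- outside any window: pending range is empty, A's outer takes over
          rw [pv_pyRange_one_nil (by omega : min (lines.length : Int) (pe + 1) ≤ (k : Int))]
          simp only [pvB_loop, pvA_inner, pvA_outer, if_neg hline, if_neg hpe]
          by_cases hmatch :
              lowered.any (fun lab => PySem.Str.lower (PySem.Str.strip raw) == lab ||
                PySem.Str.startswith (PySem.Str.lower (PySem.Str.strip raw)) lab) = true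
          · rw [if_pos hmatch, if_pos hmatch]
            have := ih (k + 1) (k + 9) hd'
            push_cast at this ⊢
            rw [this, show ((k : Int) + 9 + 1) = (k : Int) + 10 by ring]
          · rw [if_neg hmatch, if_neg hmatch]
            have := ih (k + 1) pe hd'
            push_cast at this ⊢
            rw [this, pv_pyRange_one_nil (show min (lines.length : Int) (pe + 1) ≤ (k : Int) + 1 by omega)]
            simp [pvA_inner]

-- ===== VERDICT (by name: the statement is the Claim_ definition above) =====
theorem extract_value_after_label_py_spec : Claim_equal_extract_value_after_label_py := by
  intro lines labels _
  unfold Spec_extract_value_after_label_py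
  unfold extract_value_after_label_py extract_value_after_label_py_alt
  rw [pv_lowered_eq]
  have := pv_main lines (pvA_lowered labels) lines 0 (-1) (by simp)
  push_cast at this
  rw [this, pv_pyRange_one_nil (show min (lines.length : Int) 0 ≤ (0 : Int) by omega)]
  rfl
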